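-- pv_equiv track=rewrite | github.com/yaranasserr/Leetcode | 1765-MapofHighestPeak/1765-MapofHighestPeak.py | highestPeak
-- ===== SOURCE A (Python) =====
-- from collections import deque
-- from typing import List
--
-- def highestPeak(isWater: List[List[int]]) -> List[List[int]]:
--     rows, columns = len(isWater), len(isWater[0])
--     height = [[-1] * columns for _ in range(rows)]  # Initialize all heights to -1
--     queue = deque()
--
--     # Initialize the queue with water cells
--     for r in range(rows):
--         for c in range(columns):
--             if isWater[r][c] == 1:
--                 height[r][c] = 0
--                 queue.append((r, c))
--
--     # BFS to calculate heights
--     directions = [(0, 1), (0, -1), (1, 0), (-1, 0)]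
--     while queue:
--         r, c = queue.popleft()
--         for dr, dc in directions:
--             nr, nc = r + dr, c + dc
--             if 0 <= nr < rows and 0 <= nc < columns and height[nr][nc] == -1:
--                 height[nr][nc] = height[r][c] + 1
--                 queue.append((nr, nc))
--
--     return height
-- ===== SOURCE B (Python) =====
-- from typing import List
--
-- def highestPeak(isWater: List[List[int]]) -> List[List[int]]:
--     # Closed form per cell: the height is the minimum Manhattan distance to any
--     # water cell (the grid has no obstacles), or -1 when there is no water.
--     rows, columns = len(isWater), len(isWater[0])
--     waters = [(r, c) for r in range(rows) for c in range(columns) if isWater[r][c] == 1]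
--
--     def best(r, c):
--         b = -1
--         for (wr, wc) in waters:
--             d = abs(r - wr) + abs(c - wc)
--             if b == -1 or d < b:
--                 b = d
--         return b
--
--     return [[best(r, c) for c in range(columns)] for r in range(rows)]
-- ===== Notes on version B (the rewrite author's own statement) =====
-- stated objective: alternative
-- what changed: Replaced the multi-source BFS with an explicit deque by a closed-form computation: collect the water cells once and set each cell to the minimum Manhattan distance to any water cell (-1 when there is no water), which equals the BFS height because the grid has no obstacles.
import Mathlib
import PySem

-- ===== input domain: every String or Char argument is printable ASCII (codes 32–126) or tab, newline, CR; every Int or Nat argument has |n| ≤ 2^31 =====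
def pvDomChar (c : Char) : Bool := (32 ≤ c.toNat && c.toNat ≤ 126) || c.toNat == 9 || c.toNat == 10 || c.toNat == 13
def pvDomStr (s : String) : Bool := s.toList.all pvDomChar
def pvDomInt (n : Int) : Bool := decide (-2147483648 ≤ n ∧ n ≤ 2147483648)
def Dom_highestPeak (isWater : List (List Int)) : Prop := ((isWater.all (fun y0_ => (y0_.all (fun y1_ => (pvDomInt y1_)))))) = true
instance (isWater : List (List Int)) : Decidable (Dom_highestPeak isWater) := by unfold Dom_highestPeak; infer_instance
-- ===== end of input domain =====

-- B replaces A's multi-source BFS with a deque by a closed-form computation: each cell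
-- is the minimum Manhattan distance to any water cell (-1 when there is no water);
-- objective: alternative (same result because the grid has no obstacles).


-- ===== PORT A =====
-- grid read/write helpers: exact for the in-range indices under which the ports use them
def pvGet2 (h : List (List Int)) (i j : Int) : Int :=
  PySem.List.pyGetD (PySem.List.pyGetD h i []) j 0

def pvSet2 (h : List (List Int)) (i j : Int) (v : Int) : List (List Int) :=
  PySem.List.pySetD h i (PySem.List.pySetD (PySem.List.pyGetD h i []) j v)

def pvDirs : List (Int × Int) := [(0, 1), (0, -1), (1, 0), (-1, 0)]

-- body of A's init double loop: 'if isWater[r][c] == 1: height[r][c] = 0; queue.append((r,c))'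
def pvInitStep (isWater : List (List Int))
    (st : List (List Int) × List (Int × Int)) (p : Int × Int) :
    List (List Int) × List (Int × Int) :=
  if pvGet2 isWater p.1 p.2 == 1 then (pvSet2 st.1 p.1 p.2 0, st.2 ++ [p]) else st

-- body of A's BFS inner for-loop over the four directions
def pvStep (rows columns r c : Int)
    (st : List (List Int) × List (Int × Int)) (d : Int × Int) :
    List (List Int) × List (Int × Int) :=
  -- nr = r + d.1, nc = c + d.2 inlined
  if 0 ≤ r + d.1 ∧ r + d.1 < rows ∧ 0 ≤ c + d.2 ∧ c + d.2 < columns ∧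
      pvGet2 st.1 (r + d.1) (c + d.2) = -1 then
    (pvSet2 st.1 (r + d.1) (c + d.2) (pvGet2 st.1 r c + 1), st.2 ++ [(r + d.1, c + d.2)])
  else st

-- the 'while queue' loop; fuel only makes the recursion total (proved sufficient below)
def pvBfs (rows columns : Int) : Nat → List (List Int) → List (Int × Int) → List (List Int)
  | 0, height, _ => height
  | _ + 1, height, [] => height
  | fuel + 1, height, (r, c) :: rest =>
      let st := pvDirs.foldl (pvStep rows columns r c) (height, rest)
      pvBfs rows columns fuel st.1 st.2

def highestPeak (isWater : List (List Int)) : List (List Int) :=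
  let rows : Int := isWater.length
  let columns : Int := (PySem.List.pyGetD isWater 0 []).length  -- isWater[0]; Pre_ excludes []
  let height : List (List Int) := List.replicate rows.toNat (List.replicate columns.toNat (-1))
  let init : List (List Int) × List (Int × Int) :=
    (PySem.List.pyRange 0 rows 1).foldl
      (fun st r =>
        (PySem.List.pyRange 0 columns 1).foldl
          (fun st c => pvInitStep isWater st (r, c)) st)
      (height, [])
  pvBfs rows columns (rows.toNat * columns.toNat * 2 + 1) init.1 init.2

-- ===== PORT B =====
-- B's inner loop: running minimum distance over the water list, starting from -1
def pvBest (waters : List (Int × Int)) (r c : Int) : Int :=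
  waters.foldl
    (fun best w =>
      let d : Int := ((r - w.1).natAbs : Int) + ((c - w.2).natAbs : Int)
      if best == -1 || d < best then d else best)
    (-1)

def highestPeak_alt (isWater : List (List Int)) : List (List Int) :=
  let rows : Int := isWater.length
  let columns : Int := (PySem.List.pyGetD isWater 0 []).length
  let waters : List (Int × Int) :=
    (PySem.List.pyRange 0 rows 1).flatMap
      (fun r => ((PySem.List.pyRange 0 columns 1).filter
                   (fun c => pvGet2 isWater r c == 1)).map (fun c => (r, c)))
  (PySem.List.pyRange 0 rows 1).map
    (fun r => (PySem.List.pyRange 0 columns 1).map (fun c => pvBest waters r c))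

-- ===== PRECONDITION & SPEC =====
-- Pre_ excludes exactly the inputs on which the Python raises IndexError: the empty
-- grid (isWater[0]) and grids with some row shorter than row 0 (isWater[r][c]).
def Pre_highestPeak (isWater : List (List Int)) : Prop :=
  isWater ≠ [] ∧ ∀ row ∈ isWater, (PySem.List.pyGetD isWater 0 []).length ≤ row.length

instance (isWater : List (List Int)) : Decidable (Pre_highestPeak isWater) := by
  unfold Pre_highestPeak; infer_instance

def pvWitness_highestPeak : List (List Int) := [[1, 0], [0, 0]]

def Spec_highestPeak (isWater : List (List Int)) (out : List (List Int)) : Prop := out = highestPeak_alt isWater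
instance (isWater : List (List Int)) (out : List (List Int)) : Decidable (Spec_highestPeak isWater out) := by unfold Spec_highestPeak; infer_instance

-- ===== CLAIM (what is proved, stated in full; the proofs are below) =====
def Claim_equal_highestPeak : Prop := ∀ (isWater : List (List Int)), Dom_highestPeak isWater → Pre_highestPeak isWater → Spec_highestPeak isWater (highestPeak isWater)

-- ===== LEMMAS AND PROOFS =====

/-! Geometry: Manhattan distance, in-range cells. -/

def pvManh (p q : Int × Int) : Int :=
  ((p.1 - q.1).natAbs : Int) + ((p.2 - q.2).natAbs : Int)

def pvInR (rows cols : Int) (p : Int × Int) : Prop :=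
  0 ≤ p.1 ∧ p.1 < rows ∧ 0 ≤ p.2 ∧ p.2 < cols

lemma pvManh_nonneg (p q : Int × Int) : 0 ≤ pvManh p q := by
  unfold pvManh; positivity

lemma pvManh_comm (p q : Int × Int) : pvManh p q = pvManh q p := by
  unfold pvManh; omega

lemma pvManh_tri (p m q : Int × Int) : pvManh p q ≤ pvManh p m + pvManh m q := by
  unfold pvManh; omega

lemma pvManh_eq_zero {p q : Int × Int} (h : pvManh p q = 0) : p = q := by
  unfold pvManh at h
  have h1 : p.1 = q.1 := by omega
  have h2 : p.2 = q.2 := by omega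
  exact Prod.ext h1 h2

/-! pvBest: the running-minimum fold of B. -/

def pvBStep (r c : Int) (best : Int) (w : Int × Int) : Int :=
  let d : Int := ((r - w.1).natAbs : Int) + ((c - w.2).natAbs : Int)
  if best == -1 || d < best then d else best

lemma pvBest_eq_foldl (W : List (Int × Int)) (r c : Int) :
    pvBest W r c = W.foldl (pvBStep r c) (-1) := rfl

lemma pvBStep_of_nonneg (r c : Int) {b : Int} (hb : 0 ≤ b) (w : Int × Int) :
    pvBStep r c b w = min b (pvManh (r, c) w) := by
  unfold pvBStep pvManh
  have : (b == -1) = false := by simp; omega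
  rw [this]
  simp only [Bool.false_or]
  split <;> [skip; skip] <;> simp_all <;> omega

lemma pvB_fold_nonneg (r c : Int) :
    ∀ (W : List (Int × Int)) (b : Int), 0 ≤ b → 0 ≤ W.foldl (pvBStep r c) b := by
  intro W
  induction W with
  | nil => intro b hb; simpa using hb
  | cons w W ih =>
    intro b hb
    rw [List.foldl_cons, pvBStep_of_nonneg r c hb]
    exact ih _ (le_min hb (pvManh_nonneg _ _))

lemma pvB_fold_le_init (r c : Int) :
    ∀ (W : List (Int × Int)) (b : Int), 0 ≤ b → W.foldl (pvBStep r c) b ≤ b := by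
  intro W
  induction W with
  | nil => intro b _; simp
  | cons w W ih =>
    intro b hb
    rw [List.foldl_cons, pvBStep_of_nonneg r c hb]
    exact le_trans (ih _ (le_min hb (pvManh_nonneg _ _))) (min_le_left _ _)

lemma pvB_fold_le_mem (r c : Int) :
    ∀ (W : List (Int × Int)) (b : Int), 0 ≤ b → ∀ w ∈ W,
      W.foldl (pvBStep r c) b ≤ pvManh (r, c) w := by
  intro W
  induction W with
  | nil => intro b _ w hw; simp at hw
  | cons w' W ih =>
    intro b hb w hw
    rw [List.foldl_cons, pvBStep_of_nonneg r c hb]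
    have hb' : 0 ≤ min b (pvManh (r, c) w') := le_min hb (pvManh_nonneg _ _)
    rcases List.mem_cons.mp hw with h | h
    · subst h
      exact le_trans (pvB_fold_le_init r c W _ hb') (min_le_right _ _)
    · exact ih _ hb' w h

lemma pvB_fold_attained (r c : Int) :
    ∀ (W : List (Int × Int)) (b : Int), 0 ≤ b →
      W.foldl (pvBStep r c) b = b ∨ ∃ w ∈ W, W.foldl (pvBStep r c) b = pvManh (r, c) w := by
  intro W
  induction W with
  | nil => intro b _; left; rfl
  | cons w' W ih =>
    intro b hb
    rw [List.foldl_cons, pvBStep_of_nonneg r c hb]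
    have hb' : 0 ≤ min b (pvManh (r, c) w') := le_min hb (pvManh_nonneg _ _)
    rcases ih _ hb' with h | ⟨w, hw, h⟩
    · rcases min_cases b (pvManh (r, c) w') with ⟨he, _⟩ | ⟨he, _⟩
      · left; rw [h, he]
      · right; exact ⟨w', List.mem_cons_self, by rw [h, he]⟩
    · right; exact ⟨w, List.mem_cons_of_mem _ hw, h⟩

/-! pvDd: the canonical distance value, phrased as pvBest. -/

def pvDd (W : List (Int × Int)) (p : Int × Int) : Int := pvBest W p.1 p.2

lemma pvDd_nil (p : Int × Int) : pvDd [] p = -1 := rfl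

lemma pvDd_nonneg {W : List (Int × Int)} (hW : W ≠ []) (p : Int × Int) : 0 ≤ pvDd W p := by
  cases W with
  | nil => exact absurd rfl hW
  | cons w W =>
    unfold pvDd
    rw [pvBest_eq_foldl, List.foldl_cons]
    have : pvBStep p.1 p.2 (-1) w = pvManh (p.1, p.2) w := by
      unfold pvBStep pvManh; simp
    rw [this]
    exact pvB_fold_nonneg _ _ _ _ (pvManh_nonneg _ _)

lemma pvDd_le {W : List (Int × Int)} {w : Int × Int} (hw : w ∈ W) (p : Int × Int) :
    pvDd W p ≤ pvManh p w := by
  cases W with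
  | nil => simp at hw
  | cons w' W =>
    unfold pvDd
    rw [pvBest_eq_foldl, List.foldl_cons]
    have h0 : pvBStep p.1 p.2 (-1) w' = pvManh (p.1, p.2) w' := by
      unfold pvBStep pvManh; simp
    rw [h0]
    rcases List.mem_cons.mp hw with h | h
    · subst h
      exact pvB_fold_le_init _ _ _ _ (pvManh_nonneg _ _)
    · exact pvB_fold_le_mem _ _ _ _ (pvManh_nonneg _ _) w h

lemma pvDd_attained {W : List (Int × Int)} (hW : W ≠ []) (p : Int × Int) :
    ∃ w ∈ W, pvDd W p = pvManh p w := by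
  cases W with
  | nil => exact absurd rfl hW
  | cons w' W =>
    unfold pvDd
    rw [pvBest_eq_foldl, List.foldl_cons]
    have h0 : pvBStep p.1 p.2 (-1) w' = pvManh (p.1, p.2) w' := by
      unfold pvBStep pvManh; simp
    rw [h0]
    rcases pvB_fold_attained p.1 p.2 W _ (pvManh_nonneg (p.1, p.2) w') with h | ⟨w, hw, h⟩
    · exact ⟨w', List.mem_cons_self, h⟩
    · exact ⟨w, List.mem_cons_of_mem _ hw, h⟩

lemma pvDd_water {W : List (Int × Int)} {w : Int × Int} (hw : w ∈ W) : pvDd W w = 0 := by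
  have h1 : pvDd W w ≤ 0 := by
    have := pvDd_le hw w
    have h0 : pvManh w w = 0 := by unfold pvManh; omega
    omega
  have h2 : 0 ≤ pvDd W w := pvDd_nonneg (List.ne_nil_of_mem hw) w
  omega

lemma pvDd_tri {W : List (Int × Int)} (hW : W ≠ []) (p q : Int × Int) :
    pvDd W p ≤ pvDd W q + pvManh q p := by
  obtain ⟨w, hw, he⟩ := pvDd_attained hW q
  have h1 : pvDd W p ≤ pvManh p w := pvDd_le hw p
  have h2 : pvManh p w ≤ pvManh p q + pvManh q w := pvManh_tri p q w
  have h3 : pvManh p q = pvManh q p := pvManh_comm p q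
  omega

/-! Grid shape and element access. -/

def pvShape (rows cols : Int) (h : List (List Int)) : Prop :=
  h.length = rows.toNat ∧ ∀ row ∈ h, row.length = cols.toNat

lemma pvGet2_eq_getElem (h : List (List Int)) (i j : Int) (hi : 0 ≤ i) (hj : 0 ≤ j)
    (hi2 : i.toNat < h.length) (hj2 : j.toNat < h[i.toNat].length) :
    pvGet2 h i j = h[i.toNat][j.toNat] := by
  unfold pvGet2
  rw [PySem.List.pyGetD_of_nonneg _ _ hi, List.getD_eq_getElem _ _ hi2,
      PySem.List.pyGetD_of_nonneg _ _ hj, List.getD_eq_getElem _ _ hj2]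

lemma pvShape_set2 (rows cols : Int) (h : List (List Int)) (hs : pvShape rows cols h)
    (i j : Int) (hi : 0 ≤ i) (hj : 0 ≤ j) (hi2 : i.toNat < h.length) (v : Int) :
    pvShape rows cols (pvSet2 h i j v) := by
  obtain ⟨hs1, hs2⟩ := hs
  unfold pvSet2
  rw [PySem.List.pySetD_of_nonneg _ _ hi, PySem.List.pySetD_of_nonneg _ _ hj,
      PySem.List.pyGetD_of_nonneg _ _ hi]
  refine ⟨by simpa using hs1, ?_⟩
  intro row hrow
  rcases List.mem_or_eq_of_mem_set hrow with h' | h'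
  · exact hs2 _ h'
  · subst h'
    rw [List.length_set, List.getD_eq_getElem _ _ hi2]
    exact hs2 _ (List.getElem_mem _)

lemma pvGet2_set2 (rows cols : Int) (h : List (List Int)) (hs : pvShape rows cols h)
    (p q : Int × Int) (hp : pvInR rows cols p) (hq : pvInR rows cols q) (v : Int) :
    pvGet2 (pvSet2 h p.1 p.2 v) q.1 q.2 = if q = p then v else pvGet2 h q.1 q.2 := by
  obtain ⟨hs1, hs2⟩ := hs
  obtain ⟨hp1, hp2, hp3, hp4⟩ := hp
  obtain ⟨hq1, hq2, hq3, hq4⟩ := hq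
  have hplen : p.1.toNat < h.length := by omega
  have hqlen : q.1.toNat < h.length := by omega
  have hrowp : h[p.1.toNat].length = cols.toNat := hs2 _ (List.getElem_mem _)
  have hrowq : h[q.1.toNat].length = cols.toNat := hs2 _ (List.getElem_mem _)
  have hq2r : q.2.toNat < h[q.1.toNat].length := by omega
  unfold pvSet2 pvGet2
  rw [PySem.List.pySetD_of_nonneg _ _ hp1, PySem.List.pySetD_of_nonneg _ _ hp3,
      PySem.List.pyGetD_of_nonneg (h := hp1)]
  rw [PySem.List.pyGetD_of_nonneg (h := hq1), PySem.List.pyGetD_of_nonneg (h := hq1),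
      PySem.List.pyGetD_of_nonneg (h := hq3), PySem.List.pyGetD_of_nonneg (h := hq3)]
  rw [List.getD_eq_getElem _ _ hplen]
  have hsetlen : q.1.toNat < (h.set p.1.toNat (h[p.1.toNat].set p.2.toNat v)).length := by
    simpa using hqlen
  rw [List.getD_eq_getElem _ _ hqlen, List.getD_eq_getElem _ _ hq2r,
      List.getD_eq_getElem _ _ hsetlen, List.getElem_set]
  by_cases h1 : p.1.toNat = q.1.toNat
  · rw [if_pos h1]
    have hrlen : q.2.toNat < (h[p.1.toNat].set p.2.toNat v).length := by
      rw [List.length_set, hrowp]; omega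
    rw [List.getD_eq_getElem _ _ hrlen, List.getElem_set]
    by_cases h2 : p.2.toNat = q.2.toNat
    · rw [if_pos h2]
      have hqp : q = p := Prod.ext (by omega) (by omega)
      rw [if_pos hqp]
    · rw [if_neg h2]
      have hqp : q ≠ p := by
        intro e
        exact h2 (by rw [e])
      rw [if_neg hqp]
      congr 1
      exact getElem_congr (c := h) rfl h1 hplen
  · rw [if_neg h1]
    have hqp : q ≠ p := by
      intro e
      exact h1 (by rw [e])
    rw [if_neg hqp]
    have hq2d : q.2.toNat < (h[q.1.toNat]).length := hq2r
    rw [List.getD_eq_getElem _ _ hq2d]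

/-! pvUn: number of still-unassigned (= -1) cells; the loop measure. -/

def pvUn (h : List (List Int)) : Nat :=
  (h.map (fun row => row.countP (fun x => x == -1))).sum

lemma pvUn_le (rows cols : Int) (h : List (List Int)) (hs : pvShape rows cols h) :
    pvUn h ≤ rows.toNat * cols.toNat := by
  obtain ⟨hs1, hs2⟩ := hs
  unfold pvUn
  calc (h.map (fun row => row.countP (fun x => x == -1))).sum
      ≤ (h.map (fun row => row.countP (fun x => x == -1))).length * cols.toNat := by
        apply List.sum_le_card_nsmul
        intro x hx
        obtain ⟨row, hrow, he⟩ := List.mem_map.mp hx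
        subst he
        exact le_trans (List.countP_le_length) (le_of_eq (hs2 _ hrow))
    _ = rows.toNat * cols.toNat := by rw [List.length_map, hs1]

lemma pvUn_set2 (rows cols : Int) (h : List (List Int)) (hs : pvShape rows cols h)
    (p : Int × Int) (hp : pvInR rows cols p) (hold : pvGet2 h p.1 p.2 = -1)
    (v : Int) (hv : v ≠ -1) :
    pvUn (pvSet2 h p.1 p.2 v) + 1 = pvUn h := by
  obtain ⟨hs1, hs2⟩ := hs
  obtain ⟨hp1, hp2, hp3, hp4⟩ := hp
  have hil : p.1.toNat < h.length := by omega
  have hrow : h[p.1.toNat].length = cols.toNat := hs2 _ (List.getElem_mem _)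
  have hjl : p.2.toNat < h[p.1.toNat].length := by omega
  have hentry : h[p.1.toNat][p.2.toNat] = -1 := by
    rw [← pvGet2_eq_getElem h p.1 p.2 hp1 hp3 hil hjl]; exact hold
  have hh : h = h.take p.1.toNat ++ h[p.1.toNat] :: h.drop (p.1.toNat + 1) := by
    rw [← List.drop_eq_getElem_cons hil, List.take_append_drop]
  have hrow2 : h[p.1.toNat] =
      h[p.1.toNat].take p.2.toNat ++ h[p.1.toNat][p.2.toNat] :: h[p.1.toNat].drop (p.2.toNat + 1) := by
    rw [← List.drop_eq_getElem_cons hjl, List.take_append_drop]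
  have hset : pvSet2 h p.1 p.2 v =
      h.take p.1.toNat ++
        (h[p.1.toNat].take p.2.toNat ++ v :: h[p.1.toNat].drop (p.2.toNat + 1)) ::
          h.drop (p.1.toNat + 1) := by
    unfold pvSet2
    rw [PySem.List.pySetD_of_nonneg _ _ hp1, PySem.List.pySetD_of_nonneg _ _ hp3,
        PySem.List.pyGetD_of_nonneg (h := hp1), List.getD_eq_getElem _ _ hil,
        List.set_eq_take_cons_drop _ hjl, List.set_eq_take_cons_drop _ hil]
  rw [hset]
  conv_rhs => rw [hh]
  unfold pvUn
  rw [List.map_append, List.map_append, List.sum_append, List.sum_append,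
      List.map_cons, List.map_cons, List.sum_cons, List.sum_cons]
  conv_rhs => rw [hrow2]
  rw [List.countP_append, List.countP_append, List.countP_cons, List.countP_cons]
  have e1 : ((v == -1) : Bool) = false := by simpa using hv
  have e2 : ((h[p.1.toNat][p.2.toNat] == -1) : Bool) = true := by simp [hentry]
  rw [e1, e2]
  simp
  omega

/-! Direction lemmas. -/

lemma pvManh_dir {d : Int × Int} (hd : d ∈ pvDirs) (p : Int × Int) :
    pvManh p (p.1 + d.1, p.2 + d.2) = 1 := by
  simp only [pvDirs, List.mem_cons, List.not_mem_nil, or_false] at hd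
  rcases hd with h | h | h | h <;> subst h <;> (simp only [pvManh]; omega)

lemma pvStepToward (rows cols : Int) (p u : Int × Int) (hp : pvInR rows cols p)
    (hu : pvInR rows cols u) (hne : p ≠ u) :
    ∃ d ∈ pvDirs, pvInR rows cols (p.1 + d.1, p.2 + d.2) ∧
      pvManh (p.1 + d.1, p.2 + d.2) u + 1 = pvManh p u := by
  obtain ⟨hp1, hp2, hp3, hp4⟩ := hp
  obtain ⟨hu1, hu2, hu3, hu4⟩ := hu
  rcases lt_trichotomy p.1 u.1 with h | h | h
  · exact ⟨(1, 0), by simp [pvDirs], by refine ⟨?_, ?_⟩ <;> (simp only [pvInR, pvManh]; omega)⟩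
  · have h2 : p.2 ≠ u.2 := by
      intro e
      exact hne (Prod.ext h e)
    rcases lt_or_gt_of_ne h2 with h' | h'
    · exact ⟨(0, 1), by simp [pvDirs], by refine ⟨?_, ?_⟩ <;> (simp only [pvInR, pvManh]; omega)⟩
    · exact ⟨(0, -1), by simp [pvDirs], by refine ⟨?_, ?_⟩ <;> (simp only [pvInR, pvManh]; omega)⟩
  · exact ⟨(-1, 0), by simp [pvDirs], by refine ⟨?_, ?_⟩ <;> (simp only [pvInR, pvManh]; omega)⟩

/-! The BFS loop invariant. -/

def pvAsg (h : List (List Int)) (p : Int × Int) : Prop := pvGet2 h p.1 p.2 ≠ -1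

structure pvInv (rows cols : Int) (W : List (Int × Int))
    (h : List (List Int)) (q : List (Int × Int)) : Prop where
  shape : pvShape rows cols h
  val : ∀ p, pvInR rows cols p → pvAsg h p → pvGet2 h p.1 p.2 = pvDd W p
  qmem : ∀ x ∈ q, pvInR rows cols x ∧ pvAsg h x
  qnd : q.Nodup
  closed : ∀ p, pvInR rows cols p → pvAsg h p → p ∉ q →
      ∀ d ∈ pvDirs, pvInR rows cols (p.1 + d.1, p.2 + d.2) → pvAsg h (p.1 + d.1, p.2 + d.2)
  wmem : ∀ w ∈ W, pvInR rows cols w ∧ pvAsg h w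
  qmono : q.Pairwise (fun a b => pvDd W a ≤ pvDd W b)
  qtight : ∀ a ∈ q, ∀ b ∈ q, pvDd W b ≤ pvDd W a + 1

lemma pvW_ne_of_asg {rows cols : Int} {W : List (Int × Int)} {h : List (List Int)}
    {q : List (Int × Int)} (inv : pvInv rows cols W h q) {p : Int × Int}
    (hp : pvInR rows cols p) (ha : pvAsg h p) : W ≠ [] := by
  intro hW
  subst hW
  exact ha (by rw [inv.val p hp ha, pvDd_nil])

/-! The geodesic-chain lemma: an unassigned cell always has a queue witness on a
    shortest path to it, because processed cells have all neighbours assigned. -/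

lemma pvChain {rows cols : Int} {W : List (Int × Int)} {h : List (List Int)}
    {q : List (Int × Int)} (inv : pvInv rows cols W h q) :
    ∀ k : Nat, ∀ p u, pvInR rows cols p → pvInR rows cols u → pvAsg h p → ¬ pvAsg h u →
      (pvManh p u).toNat = k → pvDd W p + pvManh p u = pvDd W u →
      ∃ x ∈ q, pvDd W x + pvManh x u = pvDd W u := by
  intro k
  induction k using Nat.strong_induction_on with
  | _ k IH =>
    intro p u hp hu hap hau hk heq
    by_cases hpq : p ∈ q
    · exact ⟨p, hpq, heq⟩
    have hW : W ≠ [] := pvW_ne_of_asg inv hp hap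
    have hne : p ≠ u := by
      intro e
      exact hau (e ▸ hap)
    obtain ⟨d, hd, hdin, hdm⟩ := pvStepToward rows cols p u hp hu hne
    have ham : pvAsg h (p.1 + d.1, p.2 + d.2) := inv.closed p hp hap hpq d hd hdin
    have h1 : pvDd W (p.1 + d.1, p.2 + d.2) ≤ pvDd W p + 1 := by
      have := pvDd_tri hW (p.1 + d.1, p.2 + d.2) p
      have h2 := pvManh_dir hd p
      have h3 := pvManh_comm p (p.1 + d.1, p.2 + d.2)
      omega
    have h2 : pvDd W u ≤ pvDd W (p.1 + d.1, p.2 + d.2) + pvManh (p.1 + d.1, p.2 + d.2) u :=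
      pvDd_tri hW u (p.1 + d.1, p.2 + d.2)
    have heq2 : pvDd W (p.1 + d.1, p.2 + d.2) + pvManh (p.1 + d.1, p.2 + d.2) u = pvDd W u := by
      omega
    have hlt : (pvManh (p.1 + d.1, p.2 + d.2) u).toNat < k := by
      have := pvManh_nonneg (p.1 + d.1, p.2 + d.2) u
      omega
    exact IH _ hlt (p.1 + d.1, p.2 + d.2) u hdin hu ham hau rfl heq2

lemma pvTerminal {rows cols : Int} {W : List (Int × Int)} {h : List (List Int)}
    (inv : pvInv rows cols W h []) :
    ∀ p, pvInR rows cols p → pvGet2 h p.1 p.2 = pvDd W p := by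
  intro p hp
  by_cases hap : pvAsg h p
  · exact inv.val p hp hap
  · rcases eq_or_ne W [] with hW | hW
    · subst hW
      rw [pvDd_nil]
      by_contra hne
      exact hap hne
    · exfalso
      obtain ⟨w, hw, he⟩ := pvDd_attained hW p
      obtain ⟨hwin, hwa⟩ := inv.wmem w hw
      have heq : pvDd W w + pvManh w p = pvDd W p := by
        rw [pvDd_water hw, pvManh_comm w p]
        omega
      obtain ⟨x, hx, -⟩ := pvChain inv (pvManh w p).toNat w p hwin hp hwa hap rfl heq
      simp at hx

/-! The inner directions-fold: intermediate characterisation and preservation. -/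

structure pvMid (rows cols : Int) (W : List (Int × Int)) (h0 : List (List Int))
    (rc : Int × Int) (h : List (List Int)) (news : List (Int × Int)) : Prop where
  shape : pvShape rows cols h
  old : ∀ p, pvInR rows cols p → pvAsg h0 p → pvGet2 h p.1 p.2 = pvGet2 h0 p.1 p.2
  val : ∀ p, pvInR rows cols p → pvAsg h p → pvGet2 h p.1 p.2 = pvDd W p
  newmem : ∀ p, pvInR rows cols p → pvAsg h p → ¬ pvAsg h0 p → p ∈ news
  news_spec : ∀ n ∈ news, pvInR rows cols n ∧ pvAsg h n ∧ ¬ pvAsg h0 n ∧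
      pvDd W n = pvDd W rc + 1
  nd : news.Nodup
  un : pvUn h + news.length = pvUn h0

lemma pvFold_spec (rows cols : Int) (W : List (Int × Int)) (h0 : List (List Int))
    (r c : Int) (rest : List (Int × Int)) (inv : pvInv rows cols W h0 ((r, c) :: rest)) :
    ∀ (ds : List (Int × Int)), (∀ d ∈ ds, d ∈ pvDirs) →
    ∀ (h : List (List Int)) (news : List (Int × Int)),
      pvMid rows cols W h0 (r, c) h news →
    ∃ h' news', ds.foldl (pvStep rows cols r c) (h, rest ++ news) = (h', rest ++ news')
      ∧ pvMid rows cols W h0 (r, c) h' news'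
      ∧ (∀ p, pvInR rows cols p → pvAsg h p → pvAsg h' p)
      ∧ (∀ d ∈ ds, pvInR rows cols (r + d.1, c + d.2) → pvAsg h' (r + d.1, c + d.2)) := by
  intro ds
  induction ds with
  | nil =>
    intro _ h news mid
    exact ⟨h, news, rfl, mid, fun p _ ha => ha, by simp⟩
  | cons d ds ihds =>
    intro hsub h news mid
    have hd : d ∈ pvDirs := hsub d List.mem_cons_self
    have hsub' : ∀ x ∈ ds, x ∈ pvDirs := fun x hx => hsub x (List.mem_cons_of_mem _ hx)
    rw [List.foldl_cons]
    by_cases hg : 0 ≤ r + d.1 ∧ r + d.1 < rows ∧ 0 ≤ c + d.2 ∧ c + d.2 < cols ∧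
        pvGet2 h (r + d.1) (c + d.2) = -1
    · -- the neighbour is newly assigned
      obtain ⟨hg1, hg2, hg3, hg4, hg5⟩ := hg
      have hnin : pvInR rows cols (r + d.1, c + d.2) := ⟨hg1, hg2, hg3, hg4⟩
      obtain ⟨hrcin, hrca0⟩ := inv.qmem (r, c) List.mem_cons_self
      have hW : W ≠ [] := pvW_ne_of_asg inv hrcin hrca0
      have hrcval : pvGet2 h r c = pvDd W (r, c) := by
        have h1 : pvGet2 h r c = pvGet2 h0 r c := mid.old (r, c) hrcin hrca0
        rw [h1]
        exact inv.val (r, c) hrcin hrca0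
      have hDd0 : 0 ≤ pvDd W (r, c) := pvDd_nonneg hW _
      have hnasg : ¬ pvAsg h (r + d.1, c + d.2) := by simp [pvAsg, hg5]
      have hnasg0 : ¬ pvAsg h0 (r + d.1, c + d.2) := by
        intro ha0
        apply hnasg
        unfold pvAsg at *
        rw [mid.old _ hnin ha0]
        exact ha0
      have hmanh1 : pvManh (r, c) (r + d.1, c + d.2) = 1 := pvManh_dir hd (r, c)
      have hupper : pvDd W (r + d.1, c + d.2) ≤ pvDd W (r, c) + 1 := by
        have := pvDd_tri hW (r + d.1, c + d.2) (r, c)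
        omega
      have hlower : pvDd W (r, c) + 1 ≤ pvDd W (r + d.1, c + d.2) := by
        obtain ⟨w, hw, he⟩ := pvDd_attained hW (r + d.1, c + d.2)
        obtain ⟨hwin, hwa⟩ := inv.wmem w hw
        have heqw : pvDd W w + pvManh w (r + d.1, c + d.2) = pvDd W (r + d.1, c + d.2) := by
          rw [pvDd_water hw, pvManh_comm]
          omega
        obtain ⟨x, hx, hxe⟩ :=
          pvChain inv (pvManh w (r + d.1, c + d.2)).toNat w (r + d.1, c + d.2)
            hwin hnin hwa hnasg0 rfl heqw
        have hxasg : pvAsg h0 x := (inv.qmem x hx).2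
        have hxn : x ≠ (r + d.1, c + d.2) := by
          intro e
          rw [e] at hxasg
          exact hnasg0 hxasg
        have hmx : 1 ≤ pvManh x (r + d.1, c + d.2) := by
          have h0' := pvManh_nonneg x (r + d.1, c + d.2)
          rcases eq_or_lt_of_le h0' with he' | he'
          · exact absurd (pvManh_eq_zero he'.symm) hxn
          · omega
        have hDdx : pvDd W (r, c) ≤ pvDd W x := by
          rcases List.mem_cons.mp hx with e | hxr
          · rw [e]
          · exact (List.pairwise_cons.mp inv.qmono).1 x hxr
        omega
      have hDdn : pvDd W (r + d.1, c + d.2) = pvDd W (r, c) + 1 := le_antisymm hupper hlower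
      have hstep : pvStep rows cols r c (h, rest ++ news) d =
          (pvSet2 h (r + d.1) (c + d.2) (pvGet2 h r c + 1),
            (rest ++ news) ++ [(r + d.1, c + d.2)]) := by
        simp only [pvStep]
        rw [if_pos ⟨hg1, hg2, hg3, hg4, hg5⟩]
      have G : ∀ q', pvInR rows cols q' →
          pvGet2 (pvSet2 h (r + d.1) (c + d.2) (pvGet2 h r c + 1)) q'.1 q'.2 =
            if q' = (r + d.1, c + d.2) then pvGet2 h r c + 1 else pvGet2 h q'.1 q'.2 :=
        fun q' hq' => pvGet2_set2 rows cols h mid.shape (r + d.1, c + d.2) q' hnin hq' _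
      have hvne : pvGet2 h r c + 1 ≠ -1 := by omega
      have mid1 : pvMid rows cols W h0 (r, c)
          (pvSet2 h (r + d.1) (c + d.2) (pvGet2 h r c + 1))
          (news ++ [(r + d.1, c + d.2)]) := by
        refine ⟨?_, ?_, ?_, ?_, ?_, ?_, ?_⟩
        · exact pvShape_set2 rows cols h mid.shape _ _ hg1 hg3
            (by obtain ⟨e, _⟩ := mid.shape; omega) _
        · intro p hp ha0
          rw [G p hp]
          have hpne : p ≠ (r + d.1, c + d.2) := by
            intro e
            rw [e] at ha0
            exact hnasg0 ha0
          rw [if_neg hpne]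
          exact mid.old p hp ha0
        · intro p hp hap
          rw [G p hp]
          by_cases hpe : p = (r + d.1, c + d.2)
          · rw [if_pos hpe, hrcval, hpe, hDdn]
          · rw [if_neg hpe]
            apply mid.val p hp
            unfold pvAsg at hap ⊢
            rw [G p hp, if_neg hpe] at hap
            exact hap
        · intro p hp hap ha0
          by_cases hpe : p = (r + d.1, c + d.2)
          · rw [hpe]
            simp
          · unfold pvAsg at hap
            rw [G p hp, if_neg hpe] at hap
            exact List.mem_append_left _ (mid.newmem p hp hap ha0)
        · intro n hn
          rcases List.mem_append.mp hn with hn' | hn'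
          · obtain ⟨hin', hasg', h0', hdd'⟩ := mid.news_spec n hn'
            refine ⟨hin', ?_, h0', hdd'⟩
            unfold pvAsg at hasg' ⊢
            have hne' : n ≠ (r + d.1, c + d.2) := by
              intro e
              rw [e] at hasg'
              exact hasg' hg5
            rw [G n hin', if_neg hne']
            exact hasg'
          · have he : n = (r + d.1, c + d.2) := by simpa using hn'
            subst he
            refine ⟨hnin, ?_, hnasg0, hDdn⟩
            unfold pvAsg
            rw [G _ hnin, if_pos rfl]
            exact hvne
        · rw [List.nodup_append]
          refine ⟨mid.nd, List.nodup_singleton _, ?_⟩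
          intro a ha b hb
          have he : b = (r + d.1, c + d.2) := by simpa using hb
          intro e
          apply hnasg
          have := (mid.news_spec a ha).2.1
          rw [e, he] at this
          exact this
        · have h2 : pvUn (pvSet2 h (r + d.1) (c + d.2) (pvGet2 h r c + 1)) + 1 = pvUn h :=
            pvUn_set2 rows cols h mid.shape (r + d.1, c + d.2) hnin hg5 _ hvne
          have hm := mid.un
          simp only [List.length_append, List.length_singleton]
          omega
      have hmono1 : ∀ p, pvInR rows cols p → pvAsg h p →
          pvAsg (pvSet2 h (r + d.1) (c + d.2) (pvGet2 h r c + 1)) p := by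
        intro p hp hap
        have hpe : p ≠ (r + d.1, c + d.2) := by
          intro e
          rw [e] at hap
          exact hnasg hap
        unfold pvAsg at *
        rw [G p hp, if_neg hpe]
        exact hap
      obtain ⟨h', news', heq', mid', mono', hall'⟩ :=
        ihds hsub' (pvSet2 h (r + d.1) (c + d.2) (pvGet2 h r c + 1))
          (news ++ [(r + d.1, c + d.2)]) mid1
      refine ⟨h', news', ?_, mid', ?_, ?_⟩
      · rw [hstep, List.append_assoc]
        exact heq'
      · exact fun p hp hap => mono' p hp (hmono1 p hp hap)
      · intro d' hd' hin'
        rcases List.mem_cons.mp hd' with e | hmem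
        · subst e
          apply mono' _ hin'
          unfold pvAsg
          rw [G _ hnin, if_pos rfl]
          exact hvne
        · exact hall' d' hmem hin'
    · -- guard false: state unchanged
      have hstep : pvStep rows cols r c (h, rest ++ news) d = (h, rest ++ news) := by
        simp only [pvStep]
        rw [if_neg hg]
      rw [hstep]
      obtain ⟨h', news', heq', mid', mono', hall'⟩ := ihds hsub' h news mid
      refine ⟨h', news', heq', mid', mono', ?_⟩
      intro d' hd' hin'
      rcases List.mem_cons.mp hd' with e | hmem
      · subst e
        apply mono' _ hin'
        obtain ⟨hi1, hi2, hi3, hi4⟩ := hin'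
        intro hcell
        exact hg ⟨hi1, hi2, hi3, hi4, hcell⟩
      · exact hall' d' hmem hin'

lemma pvStep_inv (rows cols : Int) (W : List (Int × Int)) (h0 : List (List Int))
    (r c : Int) (rest : List (Int × Int)) (inv : pvInv rows cols W h0 ((r, c) :: rest)) :
    pvInv rows cols W (pvDirs.foldl (pvStep rows cols r c) (h0, rest)).1
        (pvDirs.foldl (pvStep rows cols r c) (h0, rest)).2
      ∧ (pvDirs.foldl (pvStep rows cols r c) (h0, rest)).2.length + 1 +
          pvUn (pvDirs.foldl (pvStep rows cols r c) (h0, rest)).1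
        = pvUn h0 + ((r, c) :: rest).length := by
  have mid0 : pvMid rows cols W h0 (r, c) h0 [] := by
    refine ⟨inv.shape, fun p _ _ => rfl, inv.val, ?_, by simp, List.nodup_nil, by simp⟩
    intro p _ hap ha0
    exact absurd hap ha0
  obtain ⟨h', news', heq, mid', mono', hall⟩ :=
    pvFold_spec rows cols W h0 r c rest inv pvDirs (fun d hd => hd) h0 [] mid0
  rw [List.append_nil] at heq
  rw [heq]
  have hrest : ∀ x ∈ rest, pvInR rows cols x ∧ pvAsg h0 x :=
    fun x hx => inv.qmem x (List.mem_cons_of_mem _ hx)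
  have hold_asg : ∀ p, pvInR rows cols p → pvAsg h0 p → pvAsg h' p := by
    intro p hp hap
    unfold pvAsg at *
    rw [mid'.old p hp hap]
    exact hap
  have hhead : ∀ x ∈ rest, pvDd W (r, c) ≤ pvDd W x :=
    (List.pairwise_cons.mp inv.qmono).1
  have hrestnd : rest.Nodup := (List.nodup_cons.mp inv.qnd).2
  have hrcnotin : (r, c) ∉ rest := (List.nodup_cons.mp inv.qnd).1
  obtain ⟨hrcin, hrca0⟩ := inv.qmem (r, c) List.mem_cons_self
  constructor
  · refine ⟨mid'.shape, mid'.val, ?_, ?_, ?_, ?_, ?_, ?_⟩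
    · intro x hx
      rcases List.mem_append.mp hx with hx' | hx'
      · exact ⟨(hrest x hx').1, hold_asg x (hrest x hx').1 (hrest x hx').2⟩
      · obtain ⟨hin', hasg', _, _⟩ := mid'.news_spec x hx'
        exact ⟨hin', hasg'⟩
    · rw [List.nodup_append]
      refine ⟨hrestnd, mid'.nd, ?_⟩
      intro a ha b hb
      intro e
      have hna : ¬ pvAsg h0 b := (mid'.news_spec b hb).2.2.1
      rw [← e] at hna
      exact hna (hrest a ha).2
    · intro p hp hap hpq
      by_cases ha0 : pvAsg h0 p
      · by_cases hpe : p = (r, c)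
        · subst hpe
          intro d hd hdin
          exact hall d hd hdin
        · have hpnot : p ∉ (r, c) :: rest := by
            intro hmem
            rcases List.mem_cons.mp hmem with e | e
            · exact hpe e
            · exact hpq (List.mem_append_left _ e)
          intro d hd hdin
          exact hold_asg _ hdin (inv.closed p hp ha0 hpnot d hd hdin)
      · exact absurd (List.mem_append_right _ (mid'.newmem p hp hap ha0)) hpq
    · intro w hw
      obtain ⟨hwin, hwa⟩ := inv.wmem w hw
      exact ⟨hwin, hold_asg w hwin hwa⟩
    · rw [List.pairwise_append]
      refine ⟨inv.qmono.sublist (List.sublist_cons_self _ _), ?_, ?_⟩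
      · apply List.pairwise_of_forall_mem_list
        intro a ha b hb
        rw [(mid'.news_spec a ha).2.2.2, (mid'.news_spec b hb).2.2.2]
      · intro a ha b hb
        rw [(mid'.news_spec b hb).2.2.2]
        exact inv.qtight (r, c) List.mem_cons_self a (List.mem_cons_of_mem _ ha)
    · intro a ha b hb
      rcases List.mem_append.mp ha with ha' | ha' <;> rcases List.mem_append.mp hb with hb' | hb'
      · exact inv.qtight a (List.mem_cons_of_mem _ ha') b (List.mem_cons_of_mem _ hb')
      · rw [(mid'.news_spec b hb').2.2.2]
        have := hhead a ha'
        omega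
      · rw [(mid'.news_spec a ha').2.2.2]
        have := inv.qtight (r, c) List.mem_cons_self b (List.mem_cons_of_mem _ hb')
        omega
      · rw [(mid'.news_spec a ha').2.2.2, (mid'.news_spec b hb').2.2.2]
        omega
  · have hm := mid'.un
    simp only [List.length_append, List.length_cons]
    omega

lemma pvBfs_cons (rows cols : Int) (fuel : Nat) (h : List (List Int)) (r c : Int)
    (rest : List (Int × Int)) :
    pvBfs rows cols (fuel + 1) h ((r, c) :: rest) =
      pvBfs rows cols fuel (pvDirs.foldl (pvStep rows cols r c) (h, rest)).1
        (pvDirs.foldl (pvStep rows cols r c) (h, rest)).2 := rfl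

lemma pvBfs_correct (rows cols : Int) (W : List (Int × Int)) :
    ∀ (fuel : Nat) (h : List (List Int)) (q : List (Int × Int)),
      pvInv rows cols W h q → pvUn h + q.length ≤ fuel →
      pvShape rows cols (pvBfs rows cols fuel h q) ∧
      ∀ p, pvInR rows cols p → pvGet2 (pvBfs rows cols fuel h q) p.1 p.2 = pvDd W p := by
  intro fuel
  induction fuel with
  | zero =>
    intro h q inv hm
    have hq : q = [] := by
      cases q with
      | nil => rfl
      | cons a q => simp at hm
    subst hq
    exact ⟨inv.shape, pvTerminal inv⟩
  | succ fuel ih =>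
    intro h q inv hm
    cases q with
    | nil => exact ⟨inv.shape, pvTerminal inv⟩
    | cons rc rest =>
      obtain ⟨r, c⟩ := rc
      rw [pvBfs_cons]
      obtain ⟨inv', hm'⟩ := pvStep_inv rows cols W h r c rest inv
      apply ih _ _ inv'
      simp only [List.length_cons] at hm hm'
      omega

/-! The cell enumeration and A's initialisation loop. -/

def pvCells (rows cols : Int) : List (Int × Int) :=
  (PySem.List.pyRange 0 rows 1).flatMap
    (fun r => (PySem.List.pyRange 0 cols 1).map (fun c => (r, c)))

lemma pvCells_mem (rows cols : Int) (p : Int × Int) :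
    p ∈ pvCells rows cols ↔ pvInR rows cols p := by
  unfold pvCells pvInR
  simp only [List.mem_flatMap, List.mem_map, PySem.List.mem_pyRange_one]
  constructor
  · rintro ⟨r, ⟨hr1, hr2⟩, c, ⟨hc1, hc2⟩, e⟩
    rw [← e]
    exact ⟨hr1, hr2, hc1, hc2⟩
  · rintro ⟨h1, h2, h3, h4⟩
    exact ⟨p.1, ⟨h1, h2⟩, p.2, ⟨h3, h4⟩, rfl⟩

lemma pvCells_nodup (rows cols : Int) : (pvCells rows cols).Nodup := by
  unfold pvCells
  rw [List.nodup_flatMap]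
  constructor
  · intro r _
    exact (PySem.List.nodup_pyRange_one 0 cols).map (fun a b e => by
      simpa using congrArg Prod.snd e)
  · apply (PySem.List.pairwise_lt_pyRange_one 0 rows).imp
    intro a b hab
    intro x hx1 hx2
    obtain ⟨c1, _, e1⟩ := List.mem_map.mp hx1
    obtain ⟨c2, _, e2⟩ := List.mem_map.mp hx2
    have : a = b := by
      have f1 := congrArg Prod.fst e1
      have f2 := congrArg Prod.fst e2
      simp at f1 f2
      omega
    omega

lemma pvCells_length (rows cols : Int) :
    (pvCells rows cols).length = rows.toNat * cols.toNat := by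
  unfold pvCells
  rw [List.length_flatMap]
  have : ((PySem.List.pyRange 0 rows 1).map
      (fun r => ((PySem.List.pyRange 0 cols 1).map (fun c => (r, c))).length))
      = (PySem.List.pyRange 0 rows 1).map (fun _ => cols.toNat) := by
    apply List.map_congr_left
    intro r _
    rw [List.length_map, PySem.List.length_pyRange_one]
    simp
  rw [this, List.map_const', List.sum_replicate, PySem.List.length_pyRange_one]
  simp

lemma pvWaters_eq (isWater : List (List Int)) (rows cols : Int) :
    (PySem.List.pyRange 0 rows 1).flatMap
        (fun r => ((PySem.List.pyRange 0 cols 1).filter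
            (fun c => pvGet2 isWater r c == 1)).map (fun c => (r, c)))
      = (pvCells rows cols).filter (fun p => pvGet2 isWater p.1 p.2 == 1) := by
  unfold pvCells
  simp only [List.filter_flatMap, List.filter_map]
  rfl

lemma pvInit_eq (isWater : List (List Int)) (rows cols : Int)
    (st : List (List Int) × List (Int × Int)) :
    (PySem.List.pyRange 0 rows 1).foldl
        (fun st r => (PySem.List.pyRange 0 cols 1).foldl
          (fun st c => pvInitStep isWater st (r, c)) st) st
      = (pvCells rows cols).foldl (pvInitStep isWater) st := by
  unfold pvCells
  rw [List.foldl_flatMap]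
  simp [List.foldl_map]

lemma pvInit_fold (isWater : List (List Int)) (rows cols : Int) :
    ∀ (L : List (Int × Int)) (st : List (List Int) × List (Int × Int)),
      pvShape rows cols st.1 → (∀ p ∈ L, pvInR rows cols p) →
      pvShape rows cols (L.foldl (pvInitStep isWater) st).1 ∧
      (L.foldl (pvInitStep isWater) st).2
        = st.2 ++ L.filter (fun p => pvGet2 isWater p.1 p.2 == 1) ∧
      ∀ q, pvInR rows cols q →
        pvGet2 (L.foldl (pvInitStep isWater) st).1 q.1 q.2 =
          if q ∈ L ∧ pvGet2 isWater q.1 q.2 = 1 then 0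
          else pvGet2 st.1 q.1 q.2 := by
  intro L
  induction L with
  | nil =>
    intro st hs _
    refine ⟨hs, by simp, ?_⟩
    intro q _
    simp
  | cons p L ihL =>
    intro st hs hmem
    have hp := hmem p List.mem_cons_self
    rw [List.foldl_cons]
    by_cases hw : pvGet2 isWater p.1 p.2 = 1
    · have hstep : pvInitStep isWater st p = (pvSet2 st.1 p.1 p.2 0, st.2 ++ [p]) := by
        unfold pvInitStep
        rw [if_pos (by simp [hw])]
      rw [hstep]
      have hs' : pvShape rows cols (pvSet2 st.1 p.1 p.2 0) :=
        pvShape_set2 rows cols st.1 hs _ _ hp.1 hp.2.2.1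
          (by obtain ⟨e, _⟩ := hs; obtain ⟨a1, a2, a3, a4⟩ := hp; omega) 0
      obtain ⟨rs, rq, rg⟩ := ihL (pvSet2 st.1 p.1 p.2 0, st.2 ++ [p]) hs'
        (fun x hx => hmem x (List.mem_cons_of_mem _ hx))
      refine ⟨rs, ?_, ?_⟩
      · rw [rq]
        simp only [List.filter_cons]
        rw [if_pos (by simp [hw])]
        simp
      · intro q hq
        rw [rg q hq]
        have hGs : pvGet2 (pvSet2 st.1 p.1 p.2 0) q.1 q.2
            = if q = p then 0 else pvGet2 st.1 q.1 q.2 :=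
          pvGet2_set2 rows cols st.1 hs p q hp hq 0
        by_cases hqL : q ∈ L ∧ pvGet2 isWater q.1 q.2 = 1
        · rw [if_pos hqL, if_pos ⟨List.mem_cons_of_mem _ hqL.1, hqL.2⟩]
        · rw [if_neg hqL, hGs]
          by_cases hqp : q = p
          · rw [if_pos hqp,
              if_pos ⟨by rw [hqp]; exact List.mem_cons_self, by rw [hqp]; exact hw⟩]
          · rw [if_neg hqp, if_neg ?_]
            rintro ⟨hc1, hc2⟩
            rcases List.mem_cons.mp hc1 with e | e
            · exact hqp e
            · exact hqL ⟨e, hc2⟩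
    · have hstep : pvInitStep isWater st p = st := by
        unfold pvInitStep
        rw [if_neg (by simp [hw])]
      rw [hstep]
      obtain ⟨rs, rq, rg⟩ := ihL st hs (fun x hx => hmem x (List.mem_cons_of_mem _ hx))
      refine ⟨rs, ?_, ?_⟩
      · rw [rq]
        simp only [List.filter_cons]
        rw [if_neg (by simp [hw])]
      · intro q hq
        rw [rg q hq]
        by_cases hqL : q ∈ L ∧ pvGet2 isWater q.1 q.2 = 1
        · rw [if_pos hqL, if_pos ⟨List.mem_cons_of_mem _ hqL.1, hqL.2⟩]
        · rw [if_neg hqL, if_neg ?_]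
          rintro ⟨hc1, hc2⟩
          rcases List.mem_cons.mp hc1 with e | e
          · rw [e] at hc2
            exact hw hc2
          · exact hqL ⟨e, hc2⟩

/-! Assembly: A's init + BFS equals B's closed-form grid. -/

theorem highestPeak_main (isWater : List (List Int)) :
    highestPeak isWater = highestPeak_alt isWater := by
  simp only [highestPeak, highestPeak_alt]
  set rows : Int := (isWater.length : Int) with hrowsdef
  set cols : Int := ((PySem.List.pyGetD isWater 0 []).length : Int) with hcolsdef
  rw [pvInit_eq isWater rows cols, pvWaters_eq isWater rows cols]
  set W := (pvCells rows cols).filter (fun p => pvGet2 isWater p.1 p.2 == 1) with hWdef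
  set H0 := List.replicate rows.toNat (List.replicate cols.toNat (-1 : Int)) with hH0
  have hH0shape : pvShape rows cols H0 := by
    constructor
    · simp [hH0]
    · intro row hrow
      rw [hH0] at hrow
      rw [List.eq_of_mem_replicate hrow]
      simp
  have hcellsmem : ∀ p ∈ pvCells rows cols, pvInR rows cols p :=
    fun p hp => (pvCells_mem rows cols p).mp hp
  obtain ⟨hshapeI, hqI, hgI⟩ :=
    pvInit_fold isWater rows cols (pvCells rows cols) (H0, []) hH0shape hcellsmem
  rw [List.nil_append] at hqI
  have hH0get : ∀ q, pvInR rows cols q → pvGet2 H0 q.1 q.2 = -1 := by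
    intro q hq
    obtain ⟨h1, h2, h3, h4⟩ := hq
    have e1 : q.1.toNat < H0.length := by simp [hH0]; omega
    have e2 : q.2.toNat < H0[q.1.toNat].length := by simp [hH0]; omega
    rw [pvGet2_eq_getElem H0 q.1 q.2 h1 h3 e1 e2]
    simp [hH0]
  have hWmem : ∀ q, q ∈ W ↔ pvInR rows cols q ∧ pvGet2 isWater q.1 q.2 = 1 := by
    intro q
    rw [hWdef, List.mem_filter, pvCells_mem]
    simp
  set Hi := ((pvCells rows cols).foldl (pvInitStep isWater) (H0, [])).1 with hHi
  have hIget : ∀ q, pvInR rows cols q →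
      pvGet2 Hi q.1 q.2 = if q ∈ W then 0 else -1 := by
    intro q hq
    rw [hHi, hgI q hq]
    by_cases hqw : q ∈ W
    · rw [if_pos hqw]
      obtain ⟨-, hw⟩ := (hWmem q).mp hqw
      rw [if_pos ⟨(pvCells_mem rows cols q).mpr hq, hw⟩]
    · rw [if_neg hqw, if_neg ?_, hH0get q hq]
      rintro ⟨hc1, hc2⟩
      exact hqw ((hWmem q).mpr ⟨hq, hc2⟩)
  have hWin : ∀ x ∈ W, pvInR rows cols x ∧ pvAsg Hi x := by
    intro x hx
    obtain ⟨hin, -⟩ := (hWmem x).mp hx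
    refine ⟨hin, ?_⟩
    unfold pvAsg
    rw [hIget x hin, if_pos hx]
    omega
  have inv0 : pvInv rows cols W Hi W := by
    refine ⟨hshapeI, ?_, hWin, hWdef ▸ (pvCells_nodup rows cols).filter _, ?_, hWin, ?_, ?_⟩
    · intro p hp hap
      rw [hIget p hp]
      by_cases hpw : p ∈ W
      · rw [if_pos hpw, pvDd_water hpw]
      · unfold pvAsg at hap
        rw [hIget p hp, if_neg hpw] at hap
        exact absurd rfl hap
    · intro p hp hap hpq
      unfold pvAsg at hap
      rw [hIget p hp] at hap
      by_cases hpw : p ∈ W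
      · exact absurd hpw hpq
      · rw [if_neg hpw] at hap
        exact absurd rfl hap
    · apply List.pairwise_of_forall_mem_list
      intro a ha b hb
      rw [pvDd_water ha, pvDd_water hb]
    · intro a ha b hb
      rw [pvDd_water ha, pvDd_water hb]
      omega
  have hfuel : pvUn Hi + W.length ≤ rows.toNat * cols.toNat * 2 + 1 := by
    have h1 := pvUn_le rows cols Hi hshapeI
    have h2 : W.length ≤ rows.toNat * cols.toNat := by
      rw [hWdef, ← pvCells_length rows cols]
      exact List.length_filter_le _ _
    omega
  obtain ⟨hshapeF, hgF⟩ :=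
    pvBfs_correct rows cols W (rows.toNat * cols.toNat * 2 + 1) Hi W inv0 hfuel
  rw [hqI, ← hWdef]
  apply List.ext_getElem
  · rw [hshapeF.1, List.length_map, PySem.List.length_pyRange_one]
    simp
  · intro i h1 h2
    have hrowmem : (pvBfs rows cols (rows.toNat * cols.toNat * 2 + 1) Hi W)[i]
        ∈ pvBfs rows cols (rows.toNat * cols.toNat * 2 + 1) Hi W := List.getElem_mem _
    have hrowlen : (pvBfs rows cols (rows.toNat * cols.toNat * 2 + 1) Hi W)[i].length
        = cols.toNat := hshapeF.2 _ hrowmem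
    have hiR : i < rows.toNat := by
      rw [← hshapeF.1]
      exact h1
    apply List.ext_getElem
    · rw [hrowlen, List.getElem_map, List.length_map, PySem.List.length_pyRange_one]
      simp
    · intro j hj1 hj2
      have hjC : j < cols.toNat := by rw [← hrowlen]; exact hj1
      have hinR : pvInR rows cols ((i : Int), (j : Int)) := by
        refine ⟨by positivity, ?_, by positivity, ?_⟩ <;> · simp only []; omega
      have hget := hgF ((i : Int), (j : Int)) hinR
      have e1 : (i : Int).toNat < (pvBfs rows cols (rows.toNat * cols.toNat * 2 + 1) Hi W).length := by
        simpa using h1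
      have e2 : (j : Int).toNat <
          (pvBfs rows cols (rows.toNat * cols.toNat * 2 + 1) Hi W)[(i : Int).toNat].length := by
        simpa using hj1
      rw [pvGet2_eq_getElem _ _ _ (by positivity) (by positivity) e1 e2] at hget
      simp only [Int.toNat_natCast] at hget
      rw [hget]
      simp only [List.getElem_map, PySem.List.getElem_pyRange_one, zero_add]
      rfl

-- ===== VERDICT (by name: the statement is the Claim_ definition above) =====
theorem highestPeak_spec : Claim_equal_highestPeak := by
  unfold Claim_equal_highestPeak Spec_highestPeak
  intro isWater _hdom _hpre
  exact highestPeak_main isWater
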